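-- pv_equiv track=rewrite | github.com/hartwigmedical/trial-curator | aus_trial_universe/ctgov/iii_b_load_curated_rules.py | _auto_fix_dangling_criteria_after_list
-- ===== SOURCE A (Python) =====
-- def _auto_fix_dangling_criteria_after_list(source: str) -> str:
--     lines = source.splitlines()
--     out: list[str] = []
--
--     for i, line in enumerate(lines):
--         stripped = line.strip()
--         if stripped == "criteria":
--             start = max(0, i - 10)
--             window = lines[start:i]
--             if any("curation=" in prev for prev in window):
--                 continue
--
--         out.append(line)
--
--     return "\n".join(out)
-- ===== SOURCE B (Python) =====
-- def _auto_fix_dangling_criteria_after_list(source: str) -> str: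
--     out: list[str] = []
--     last_curation_idx = None
--     for i, line in enumerate(source.splitlines()):
--         if line.strip() == "criteria" and last_curation_idx is not None and i - last_curation_idx <= 10:
--             pass
--         else:
--             out.append(line)
--         if "curation=" in line:
--             last_curation_idx = i
--     return "\n".join(out)
-- ===== Notes on version B (the rewrite author's own statement) =====
-- stated objective: simpler
-- what changed: B replaces A's per-'criteria'-line slicing of a 10-line window and inner any-scan by a single pass that only remembers the index of the most recent 'curation=' line and compares i - last_curation_idx <= 10.
import Mathlib
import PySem

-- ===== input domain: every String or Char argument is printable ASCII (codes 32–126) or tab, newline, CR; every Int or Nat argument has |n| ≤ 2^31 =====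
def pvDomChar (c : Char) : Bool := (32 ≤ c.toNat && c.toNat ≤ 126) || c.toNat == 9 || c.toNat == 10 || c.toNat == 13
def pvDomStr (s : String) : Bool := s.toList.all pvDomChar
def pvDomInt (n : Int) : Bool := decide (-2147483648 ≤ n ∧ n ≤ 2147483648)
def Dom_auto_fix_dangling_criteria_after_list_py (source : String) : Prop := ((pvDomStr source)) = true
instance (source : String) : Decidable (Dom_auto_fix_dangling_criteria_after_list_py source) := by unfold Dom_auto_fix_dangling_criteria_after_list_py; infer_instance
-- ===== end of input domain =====

-- B replaces A's per-line 10-line window slice + inner scan by a single pass that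
-- remembers only the index of the last 'curation=' line (objective: simpler).

-- ===== PORT A =====
-- A's loop body: if the stripped line is "criteria" and any of lines[max(0,i-10):i]
-- contains "curation=", skip (continue); else append.
def pvStepA (lines : List String) (out : List String) (p : Int × String) : List String :=
  let line := p.2
  let stripped := PySem.Str.strip line
  if stripped == "criteria" then
    let start := max 0 (p.1 - 10)
    let window := PySem.List.slice lines (some start) (some p.1)
    if window.any (fun prev => PySem.Str.isIn "curation=" prev) then out
    else out ++ [line]
  else out ++ [line]

def auto_fix_dangling_criteria_after_list_py (source : String) : String :=
  let lines := PySem.Str.splitlines source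
  PySem.Str.join "\n" ((PySem.List.enumerate lines 0).foldl (pvStepA lines) [])

-- ===== PORT B =====
-- B's loop body over state (out, last_curation_idx): skip a "criteria" line when a
-- 'curation=' line occurred at most 10 lines back; then update last_curation_idx.
def pvStepB (st : List String × Option Int) (p : Int × String) : List String × Option Int :=
  let line := p.2
  let skip := PySem.Str.strip line == "criteria" &&
    (match st.2 with
     | some l => decide (p.1 - l ≤ 10)
     | none => false)
  let out' := if skip then st.1 else st.1 ++ [line]
  let last' := if PySem.Str.isIn "curation=" line then some p.1 else st.2
  (out', last')

def auto_fix_dangling_criteria_after_list_py_alt (source : String) : String :=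
  PySem.Str.join "\n"
    (((PySem.List.enumerate (PySem.Str.splitlines source) 0).foldl pvStepB ([], none)).1)

-- ===== PRECONDITION & SPEC =====
def Spec_auto_fix_dangling_criteria_after_list_py (source : String) (out : String) : Prop := out = auto_fix_dangling_criteria_after_list_py_alt source
instance (source : String) (out : String) : Decidable (Spec_auto_fix_dangling_criteria_after_list_py source out) := by unfold Spec_auto_fix_dangling_criteria_after_list_py; infer_instance

-- ===== CLAIM (what is proved, stated in full; the proofs are below) =====
def Claim_equal_auto_fix_dangling_criteria_after_list_py : Prop := ∀ (source : String), Dom_auto_fix_dangling_criteria_after_list_py source → Spec_auto_fix_dangling_criteria_after_list_py source (auto_fix_dangling_criteria_after_list_py source)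

-- ===== LEMMAS AND PROOFS =====

-- `pvCur line` = Python's `"curation=" in line`
def pvCur (line : String) : Bool := PySem.Str.isIn "curation=" line

-- any over a drop/take window, characterised by absolute indices
lemma pv_any_drop_take (p : String → Bool) (xs : List String) (a k : Nat) :
    (((xs.drop a).take k).any p = true) ↔
      ∃ (j : Nat) (h : j < xs.length), a ≤ j ∧ j < a + k ∧ p xs[j] = true := by
  rw [List.any_eq_true]
  constructor
  · rintro ⟨x, hx, hp⟩
    rw [List.mem_iff_getElem] at hx
    obtain ⟨i, hi, rfl⟩ := hx
    have hi' := hi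
    simp [List.length_take, List.length_drop] at hi'
    refine ⟨a + i, by omega, by omega, by omega, ?_⟩
    have : ((xs.drop a).take k)[i] = xs[a + i]'(by omega) := by
      rw [List.getElem_take, List.getElem_drop]
    rw [this] at hp; exact hp
  · rintro ⟨j, h, haj, hjk, hp⟩
    refine ⟨xs[j], ?_, hp⟩
    rw [List.mem_iff_getElem]
    refine ⟨j - a, by simp [List.length_take, List.length_drop]; omega, ?_⟩
    rw [List.getElem_take, List.getElem_drop]
    congr 1; omega

-- A's window test agrees with B's last-index test under the invariant on `last`
lemma pv_cond_eq (lines : List String) (n : Nat) (last : Option Int)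
    (h1 : ∀ l : Int, last = some l → 0 ≤ l ∧ l.toNat < n ∧ ∃ h : l.toNat < lines.length, pvCur lines[l.toNat] = true)
    (h2 : ∀ j : Nat, j < n → ∀ h : j < lines.length, pvCur lines[j] = true → ∃ l : Int, last = some l ∧ (j : Int) ≤ l) :
    ((PySem.List.slice lines (some (max 0 ((n : Int) - 10))) (some (n : Int))).any
        (fun prev => PySem.Str.isIn "curation=" prev) = true) ↔
      (match last with
       | some l => decide ((n : Int) - l ≤ 10)
       | none => false) = true := by
  have ha : (0 : Int) ≤ max 0 ((n : Int) - 10) := le_max_left _ _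
  rw [PySem.List.slice_toNat _ ha (by positivity)]
  rw [pv_any_drop_take]
  have hat : (max 0 ((n : Int) - 10)).toNat = n - 10 := by omega
  have hnt : (n : Int).toNat = n := by omega
  rw [hat, hnt]
  constructor
  · rintro ⟨j, h, haj, hjn, hp⟩
    obtain ⟨l, hl, hjl⟩ := h2 j (by omega) h hp
    obtain ⟨hl0, hln, _⟩ := h1 l hl
    simp [hl]
    omega
  · intro hmatch
    match last, hmatch with
    | some l, hm =>
      obtain ⟨hl0, hln, hlt, hcur⟩ := h1 l rfl
      simp at hm
      exact ⟨l.toNat, hlt, by omega, by omega, hcur⟩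

-- main loop invariant
lemma pv_loop (lines : List String) (suf : List String) : ∀ (n : Nat), suf = lines.drop n →
    ∀ (acc : List String) (last : Option Int),
    (∀ l : Int, last = some l → 0 ≤ l ∧ l.toNat < n ∧ ∃ h : l.toNat < lines.length, pvCur lines[l.toNat] = true) →
    (∀ j : Nat, j < n → ∀ h : j < lines.length, pvCur lines[j] = true → ∃ l : Int, last = some l ∧ (j : Int) ≤ l) →
    (PySem.List.enumerate suf n).foldl (pvStepA lines) acc =
      ((PySem.List.enumerate suf n).foldl pvStepB (acc, last)).1 := by
  induction suf with
  | nil => intro n _ acc last _ _; simp [PySem.List.enumerate]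
  | cons x rest ih =>
    intro n hsuf acc last h1 h2
    have hn : n < lines.length := by
      by_contra h
      rw [List.drop_eq_nil_of_le (by omega)] at hsuf
      simp at hsuf
    have hx : x = lines[n] := by
      have h0 : lines.drop n = lines[n] :: lines.drop (n+1) := List.drop_eq_getElem_cons hn
      rw [← hsuf] at h0
      exact (List.cons.injEq _ _ _ _ ▸ h0).1

    have hrest : rest = lines.drop (n + 1) := by
      have h0 : lines.drop n = lines[n] :: lines.drop (n+1) := List.drop_eq_getElem_cons hn
      rw [← hsuf] at h0
      exact (List.cons.injEq _ _ _ _ ▸ h0).2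
    rw [PySem.List.enumerate_cons]
    simp only [List.foldl_cons]
    have hcond := pv_cond_eq lines n last h1 h2
    have hstep : pvStepA lines acc ((n : Int), x) = (pvStepB (acc, last) ((n : Int), x)).1 := by
      simp only [pvStepA, pvStepB]
      by_cases hc : (PySem.Str.strip x == "criteria") = true
      · rw [if_pos hc]
        by_cases hw : (PySem.List.slice lines (some (max 0 ((n:Int) - 10))) (some ((n:Int)))).any
            (fun prev => PySem.Str.isIn "curation=" prev) = true
        · rw [if_pos hw, if_pos (by simp only [hc, Bool.true_and]; exact hcond.mp hw)]
        · rw [if_neg hw, if_neg (by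
            simp only [hc, Bool.true_and]
            exact fun h => hw (hcond.mpr h))]
      · rw [if_neg hc, if_neg (by
          simp only [Bool.and_eq_true]
          exact fun h => hc h.1)]
    rw [hstep]
    have hB : pvStepB (acc, last) ((n : Int), x) =
        ((pvStepB (acc, last) ((n : Int), x)).1,
          if pvCur x = true then some (n : Int) else last) := by
      simp only [pvStepB, pvCur]
      rfl
    have hcast : (n : Int) + 1 = ((n + 1 : Nat) : Int) := by push_cast; ring
    rw [hcast, hB]
    apply ih (n + 1) hrest _ _
    · intro l hl
      by_cases hcx : pvCur x = true
      · rw [if_pos hcx] at hl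
        cases hl
        exact ⟨by omega, by omega, by rw [show ((n : Int)).toNat = n by omega]; exact ⟨hn, hx ▸ hcx⟩⟩
      · rw [if_neg hcx] at hl
        obtain ⟨a1, a2, a3⟩ := h1 l hl
        exact ⟨a1, by omega, a3⟩
    · intro j hj hjl hcj
      by_cases hcx : pvCur x = true
      · rw [if_pos hcx]
        exact ⟨(n : Int), rfl, by omega⟩
      · rw [if_neg hcx]
        have hjn : j < n := by
          rcases Nat.lt_succ_iff_lt_or_eq.mp hj with h | h
          · exact h
          · subst h; exact absurd (hx ▸ hcj) hcx
        exact h2 j hjn hjl hcj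

-- ===== VERDICT (by name: the statement is the Claim_ definition above) =====
theorem auto_fix_dangling_criteria_after_list_py_spec : Claim_equal_auto_fix_dangling_criteria_after_list_py := by
  intro source _
  unfold Spec_auto_fix_dangling_criteria_after_list_py
  unfold auto_fix_dangling_criteria_after_list_py auto_fix_dangling_criteria_after_list_py_alt
  exact congrArg (PySem.Str.join "\n")
    (pv_loop (PySem.Str.splitlines source) (PySem.Str.splitlines source) 0 rfl [] none
      (by intro l h; cases h) (by intro j hj; omega))
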